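-- pv_equiv track=rewrite | github.com/K4zuki/tinyI2C | python/TinyI2C.py | hex2ascii
-- ===== SOURCE A (Python) =====
-- def hex2ascii(h, mask=0x30):
--     """ converts hex data to string
--     Args:
--         h(int): data in HEX
--         mask(int): mask data in HEX, LSB must be 0, MSB must not be 0 (0x?0, ?>8)
--
--     Returns:
--         list: converted format in list
--     """
--     h = int(h)
--     assert isinstance(h, int)
--     chars_in_reverse = []
--     chars_in_reverse.append(chr(mask | (h & 0x0F)))
--     chars_in_reverse.append(chr(mask | ((h >> 4) & 0x0F)))
--     h = h >> 8
--     while h != 0x0: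
--         chars_in_reverse.append(chr(mask | (h & 0x0F)))
--         chars_in_reverse.append(chr(mask | ((h >> 4) & 0x0F)))
--         h = h >> 8
--
--     return (chars_in_reverse)
-- ===== SOURCE B (Python) =====
-- def hex2ascii(h, mask=0x30):
--     """ converts hex data to string (hex-string re-implementation) """
--     h = int(h)
--     assert isinstance(h, int)
--     hx = format(h, 'x')
--     if len(hx) % 2:
--         hx = '0' + hx
--     return [chr(mask | int(d, 16)) for d in reversed(hx)]
-- ===== Notes on version B (the rewrite author's own statement) =====
-- stated objective: alternative
-- what changed: Replaces A's destructive shift-and-test while loop over nibbles with string formatting: format(h,'x') produces the big-endian hex digit string, which is zero-padded to even length and mapped in reverse through chr(mask|digit) — no shifting loop remains.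
-- outside the precondition, e.g. on hex2ascii(-1, 48): A does not finish within the time limit, B raises ValueError; on hex2ascii(0, -1): A raises ValueError, B raises ValueError
import Mathlib
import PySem

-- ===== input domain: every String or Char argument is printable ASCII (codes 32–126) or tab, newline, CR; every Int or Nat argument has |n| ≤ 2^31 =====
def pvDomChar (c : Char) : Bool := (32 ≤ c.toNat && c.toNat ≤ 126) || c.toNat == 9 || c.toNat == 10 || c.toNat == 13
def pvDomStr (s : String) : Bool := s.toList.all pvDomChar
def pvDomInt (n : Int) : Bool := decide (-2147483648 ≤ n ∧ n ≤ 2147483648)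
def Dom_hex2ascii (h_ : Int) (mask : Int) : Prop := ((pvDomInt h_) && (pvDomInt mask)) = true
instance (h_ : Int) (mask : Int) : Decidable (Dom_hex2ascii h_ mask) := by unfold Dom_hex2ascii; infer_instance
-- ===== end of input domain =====

-- B replaces A's shift-and-test while loop with hex-string formatting: big-endian
-- hex digits, zero-padded to even length, read in reverse (alternative decomposition, same cost).


-- chr(n) as a one-character string (exact for valid non-surrogate code points, which Pre_ guarantees)
def pvChr (n : Nat) : String := String.mk [Char.ofNat n]

-- ===== PORT A =====
-- the while loop: while h != 0: append chr(mask|(h&0xF)); append chr(mask|((h>>4)&0xF)); h >>= 8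
def pvLoopA (m : Nat) (n : Nat) (acc : List String) : List String :=
  if h : n = 0 then acc
  else pvLoopA m (n >>> 8)
        (acc ++ [pvChr (m ||| (n &&& 0x0F)), pvChr (m ||| ((n >>> 4) &&& 0x0F))])
  decreasing_by
    simp only [Nat.shiftRight_eq_div_pow]
    exact Nat.div_lt_self (Nat.pos_of_ne_zero h) (by norm_num)

def hex2ascii (h_ : Int) (mask : Int) : List String :=
  -- h = int(h) is the identity on ints; Pre_ gives h_ ≥ 0 and mask ≥ 0, so toNat is exact
  -- (Python A never returns on negative h, and chr raises on negative mask — both outside Pre_)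
  let h := h_.toNat
  let m := mask.toNat
  let chars := [pvChr (m ||| (h &&& 0x0F)), pvChr (m ||| ((h >>> 4) &&& 0x0F))]
  pvLoopA m (h >>> 8) chars

-- ===== PORT B =====
-- format(h,'x'): the big-endian base-16 digit expansion of a nonnegative integer (digit values)
def pvHexBE (n : Nat) : List Nat :=
  if h : n < 16 then [n] else pvHexBE (n / 16) ++ [n % 16]
  decreasing_by exact Nat.div_lt_self (by omega) (by norm_num)

-- "if len(hx) % 2: hx = '0' + hx"
def pvPad (l : List Nat) : List Nat := if l.length % 2 = 1 then 0 :: l else l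

def hex2ascii_alt (h_ : Int) (mask : Int) : List String :=
  let h := h_.toNat
  let m := mask.toNat
  let hx := pvPad (pvHexBE h)
  hx.reverse.map (fun d => pvChr (m ||| d))

-- ===== PRECONDITION & SPEC =====
-- Pre_ excludes negative h (A's while loop never terminates), masks that are negative or so large
-- that chr raises ValueError, and masks whose output characters land in the UTF-16 surrogate range
-- 0xD800–0xDFFF (Python returns lone-surrogate strings there, which Lean's String cannot represent);
-- mask / 16 * 16 + 15 is the largest character code the function can emit for this mask.
def Pre_hex2ascii (h_ : Int) (mask : Int) : Prop :=
  0 ≤ h_ ∧ 0 ≤ mask ∧ (mask / 16 * 16 + 15 < 0xD800 ∨ (0xE000 ≤ mask ∧ mask < 0x110000))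
instance (h_ : Int) (mask : Int) : Decidable (Pre_hex2ascii h_ mask) := by unfold Pre_hex2ascii; infer_instance

def pvWitness_hex2ascii : Int × Int := (0x1234, 0x30)

def Spec_hex2ascii (h_ : Int) (mask : Int) (out : List String) : Prop := out = hex2ascii_alt h_ mask
instance (h_ : Int) (mask : Int) (out : List String) : Decidable (Spec_hex2ascii h_ mask out) := by unfold Spec_hex2ascii; infer_instance

-- ===== CLAIM (what is proved, stated in full; the proofs are below) =====
def Claim_equal_hex2ascii : Prop := ∀ (h_ : Int) (mask : Int), Dom_hex2ascii h_ mask → Pre_hex2ascii h_ mask → Spec_hex2ascii h_ mask (hex2ascii h_ mask)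

-- ===== LEMMAS AND PROOFS =====

-- common reference: the little-endian nibble values A emits (two per byte)
def pvLE2 (n : Nat) : List Nat :=
  n % 16 :: n / 16 % 16 :: (if h : n / 256 = 0 then [] else pvLE2 (n / 256))
  decreasing_by
    exact Nat.div_lt_self
      (by rcases Nat.eq_zero_or_pos n with h0 | h0
          · simp [h0] at h
          · exact h0)
      (by norm_num)

lemma pv_and15 (n : Nat) : n &&& 15 = n % 16 := by
  have := Nat.and_two_pow_sub_one_eq_mod n 4
  norm_num at this; omega

lemma pv_shift4 (n : Nat) : n >>> 4 = n / 16 := by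
  simp [Nat.shiftRight_eq_div_pow]

lemma pv_shift8 (n : Nat) : n >>> 8 = n / 256 := by
  simp [Nat.shiftRight_eq_div_pow]

-- A's loop, on a nonzero argument, appends the mapped little-endian nibbles
lemma pvLoopA_eq (m : Nat) : ∀ n acc, n ≠ 0 →
    pvLoopA m n acc = acc ++ (pvLE2 n).map (fun d => pvChr (m ||| d)) := by
  intro n
  induction n using Nat.strong_induction_on with
  | _ n ih =>
    intro acc hn
    rw [pvLoopA]; simp only [hn, dif_neg, not_false_iff]
    rw [pv_shift8, pv_and15, pv_shift4, pv_and15]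
    by_cases h2 : n / 256 = 0
    · rw [h2, pvLoopA]; simp only [reduceDIte]
      rw [pvLE2]; simp [h2]
    · rw [ih (n / 256) (Nat.div_lt_self (Nat.pos_of_ne_zero hn) (by norm_num)) _ h2]
      conv_rhs => rw [pvLE2]
      simp [h2]

-- A's whole result is the mapped little-endian nibbles
lemma hex2ascii_eq (h_ : Int) (mask : Int) :
    hex2ascii h_ mask = (pvLE2 h_.toNat).map (fun d => pvChr (mask.toNat ||| d)) := by
  unfold hex2ascii
  simp only [pv_shift8, pv_and15, pv_shift4]
  by_cases h2 : h_.toNat / 256 = 0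
  · rw [h2, pvLoopA]; simp only [reduceDIte]
    rw [pvLE2]; simp [h2]
  · rw [pvLoopA_eq _ _ _ h2]
    conv_rhs => rw [pvLE2]
    simp [h2]

-- padding commutes with appending two digits
lemma pvPad_append2 (l : List Nat) (a b : Nat) :
    pvPad (l ++ [a, b]) = pvPad l ++ [a, b] := by
  unfold pvPad
  have : (l ++ [a, b]).length % 2 = l.length % 2 := by
    simp [List.length_append]
  rw [this]
  split_ifs <;> try simp

-- B's padded-reversed hex string is exactly A's little-endian nibble list
lemma pvPadRev_eq : ∀ n, (pvPad (pvHexBE n)).reverse = pvLE2 n := by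
  intro n
  induction n using Nat.strong_induction_on with
  | _ n ih =>
    by_cases h16 : n < 16
    · rw [pvHexBE]; simp only [dif_pos h16]
      rw [pvLE2]
      have h256 : n / 256 = 0 := Nat.div_eq_of_lt (by omega)
      simp [pvPad, h256, Nat.mod_eq_of_lt h16, Nat.div_eq_of_lt h16]
    · by_cases h256 : n < 256
      · have hq : n / 16 < 16 := by omega
        rw [pvHexBE]; simp only [dif_neg h16]
        rw [pvHexBE]; simp only [dif_pos hq]
        rw [pvLE2]
        have hz : n / 256 = 0 := Nat.div_eq_of_lt h256
        simp [pvPad, hz, Nat.mod_eq_of_lt hq]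
      · have hq16 : ¬ n / 16 < 16 := by omega
        rw [pvHexBE]; simp only [dif_neg h16]
        rw [pvHexBE]; simp only [dif_neg hq16]
        have hdd : n / 16 / 16 = n / 256 := by
          rw [Nat.div_div_eq_div_mul]
        rw [hdd, List.append_assoc]
        have : ([(n / 16) % 16] ++ [n % 16]) = [n / 16 % 16, n % 16] := rfl
        rw [this, pvPad_append2, List.reverse_append]
        rw [ih (n / 256) (Nat.div_lt_self (by omega) (by norm_num))]
        have hz : ¬ n / 256 = 0 := by
          intro h; have := Nat.lt_of_div_eq_zero (by norm_num) h; omega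
        conv_rhs => rw [pvLE2]
        simp [hz]

-- ===== VERDICT (by name: the statement is the Claim_ definition above) =====
theorem hex2ascii_spec : Claim_equal_hex2ascii := by
  intro h_ mask _ _
  unfold Spec_hex2ascii hex2ascii_alt
  rw [hex2ascii_eq, ← pvPadRev_eq]
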